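-- pv_equiv track=rewrite | github.com/HoangPhan10/python | Test22.py | fermat
-- ===== SOURCE A (Python) =====
-- def binhPhuongCoLap(a,k,n):
--     b=1
--     if k==0 :
--         return b
--     A =a
--     binK = list(bin(k)[::-1].split('b0')[0])
--
--     if int(binK[0])==1:
--         b=a
--     for i in range(1,len(binK)):
--         A = pow(A,2)%n
--         if int(binK[i])==1 :
--             b=(A*b)%n
--     return b
--
-- def fermat(n,t):
--     if n<2:
--         return False
--     if n==2 or n==3:
--         return True
--     if n %2==0 :
--         return False
--     a = 2
--     for i in range(1,t+1):
--         x = binhPhuongCoLap(a,n-1,n)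
--         a+=1
--         if x != 1:
--             return False
--     return True
-- ===== SOURCE B (Python) =====
-- def _modpow(a, k, n):
--     # recursive square-and-multiply, MSB-first on the exponent
--     if k == 0:
--         return 1
--     h = _modpow(a, k // 2, n)
--     h = h * h % n
--     if k % 2 == 1:
--         h = h * (a % n) % n
--     return h
--
-- def fermat(n, t):
--     if n < 2 or n % 2 == 0:
--         return n == 2
--     if n == 3:
--         return True
--     return all(_modpow(a, n - 1, n) == 1 for a in range(2, t + 2))
-- ===== Notes on version B (the rewrite author's own statement) =====
-- stated objective: alternative
-- what changed: Replaces the hand-rolled LSB-first binary-string modular exponentiation with a recursive MSB-first divide-and-conquer modpow, and the base loop with an all() over range(2, t+2).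
import Mathlib
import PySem

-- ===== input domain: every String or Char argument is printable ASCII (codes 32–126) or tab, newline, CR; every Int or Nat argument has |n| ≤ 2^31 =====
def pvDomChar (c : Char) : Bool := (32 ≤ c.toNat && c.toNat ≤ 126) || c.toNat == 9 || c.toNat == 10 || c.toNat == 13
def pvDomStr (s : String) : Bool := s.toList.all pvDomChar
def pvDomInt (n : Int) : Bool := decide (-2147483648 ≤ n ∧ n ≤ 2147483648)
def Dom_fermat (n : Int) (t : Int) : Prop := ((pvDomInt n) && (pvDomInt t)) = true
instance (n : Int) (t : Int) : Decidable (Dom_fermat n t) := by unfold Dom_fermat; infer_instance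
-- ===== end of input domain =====

-- B replaces A's hand-rolled LSB-first binary-string modular exponentiation with a
-- recursive MSB-first divide-and-conquer modpow and an all() over the base range (alternative decomposition).


-- ===== PORT A =====
-- 'list(bin(k)[::-1].split('b0')[0])' for k > 0 is exactly the binary digits of k
-- LSB-first; ported as this digit list (fermat only calls the helper with k = n-1 > 0).
def bitsLSB : Nat → List Nat
  | 0 => []
  | k+1 => ((k+1) % 2) :: bitsLSB ((k+1)/2)
decreasing_by exact Nat.div_lt_self (Nat.succ_pos k) (by omega)

-- the 'for i in range(1,len(binK))' loop: state (A, b), one step per remaining digit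
def binLoop (n : Int) : List Nat → Int → Int → Int
  | [], _, b => b
  | bit :: rest, A, b =>
      let A' := PySem.Int.mod (A^2) n
      binLoop n rest A' (if bit == 1 then PySem.Int.mod (A' * b) n else b)

def binhPhuongCoLap (a k n : Int) : Int :=
  if k == 0 then 1
  else
    let binK := bitsLSB k.toNat
    let b := if binK.headD 0 == 1 then a else 1
    binLoop n binK.tail a b

-- the 'for i in range(1,t+1)' loop of fermat, with early return False
def fermatLoop (n : Int) : List Int → Int → Bool
  | [], _ => true
  | _ :: rest, a =>
      let x := binhPhuongCoLap a (n-1) n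
      if x ≠ 1 then false else fermatLoop n rest (a+1)

def fermat (n : Int) (t : Int) : Bool :=
  if n < 2 then false
  else if n == 2 || n == 3 then true
  else if PySem.Int.mod n 2 == 0 then false
  else fermatLoop n (PySem.List.pyRange 1 (t+1) 1) 2

-- ===== PORT B =====
-- Source B's _modpow; its exponent k is always a nonnegative int there, ported as Nat
def modpowAlt (a : Int) (k : Nat) (n : Int) : Int :=
  if k = 0 then 1
  else
    let h := modpowAlt a (k / 2) n
    let h := PySem.Int.mod (h * h) n
    if k % 2 = 1 then PySem.Int.mod (h * PySem.Int.mod a n) n else h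
decreasing_by exact Nat.div_lt_self (by omega) (by omega)

def fermat_alt (n : Int) (t : Int) : Bool :=
  if n < 2 || PySem.Int.mod n 2 == 0 then n == 2
  else if n == 3 then true
  else (PySem.List.pyRange 2 (t+2) 1).all (fun a => modpowAlt a (n-1).toNat n == 1)

-- ===== PRECONDITION & SPEC =====
def Spec_fermat (n : Int) (t : Int) (out : Bool) : Prop := out = fermat_alt n t
instance (n : Int) (t : Int) (out : Bool) : Decidable (Spec_fermat n t out) := by unfold Spec_fermat; infer_instance

-- ===== CLAIM (what is proved, stated in full; the proofs are below) =====
def Claim_equal_fermat : Prop := ∀ (n : Int) (t : Int), Dom_fermat n t → Spec_fermat n t (fermat n t)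

-- ===== LEMMAS AND PROOFS =====

theorem modEq_emod (x n : Int) : x % n ≡ x [ZMOD n] := Int.emod_emod_of_dvd _ dvd_rfl

theorem modEq_to_eq {n x y : Int} (h : x ≡ y [ZMOD n]) : x % n = y % n := h

-- value of an LSB-first digit list (counting a digit as set iff it equals 1)
def bitVal : List Nat → Nat
  | [] => 0
  | bit :: r => (if bit = 1 then 1 else 0) + 2 * bitVal r

theorem bitVal_bitsLSB (m : Nat) : bitVal (bitsLSB m) = m := by
  induction m using Nat.strong_induction_on with
  | _ m ih =>
    match m with
    | 0 => simp [bitsLSB, bitVal]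
    | k+1 =>
      rw [bitsLSB, bitVal, ih ((k+1)/2) (Nat.div_lt_self (by omega) (by omega))]
      rcases Nat.mod_two_eq_zero_or_one (k+1) with h | h <;> simp [h] <;> omega

theorem bitVal_eq_zero_of_not_mem (bits : List Nat) (h : 1 ∉ bits) : bitVal bits = 0 := by
  induction bits with
  | nil => rfl
  | cons bit r ih =>
    simp only [List.mem_cons, not_or] at h
    simp [bitVal, Ne.symm h.1, ih h.2]

theorem binLoop_no_one (n : Int) (bits : List Nat) (h : 1 ∉ bits) :
    ∀ A b : Int, binLoop n bits A b = b := by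
  induction bits with
  | nil => intro A b; rfl
  | cons x r ih =>
    intro A b
    simp only [List.mem_cons, not_or] at h
    rw [binLoop, if_neg (by simp; omega)]
    exact ih h.2 _ _

theorem binLoop_val (n : Int) (hn : 0 < n) (bits : List Nat) (h1 : 1 ∈ bits) :
    ∀ A b : Int, binLoop n bits A b = ((A ^ 2) ^ bitVal bits * b) % n := by
  induction bits with
  | nil => simp at h1
  | cons bit rest ih =>
    intro A b
    rw [binLoop]
    simp only [PySem.Int.mod_eq_emod_of_pos hn, bitVal]
    have hA : A ^ 2 % n ≡ A ^ 2 [ZMOD n] := modEq_emod _ _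
    by_cases hr : 1 ∈ rest
    · rw [ih hr]
      by_cases hb : bit = 1
      · rw [if_pos (by simp [hb]), if_pos hb]
        have e : (A ^ 2) ^ (1 + 2 * bitVal rest) * b
               = ((A ^ 2) ^ 2) ^ bitVal rest * (A ^ 2 * b) := by
          rw [pow_add, pow_one, ← pow_mul, ← pow_mul]; ring
        rw [e]
        exact modEq_to_eq (((hA.pow 2).pow _).mul ((modEq_emod _ _).trans (hA.mul_right b)))
      · rw [if_neg (by simp [hb]), if_neg hb]
        have e : (A ^ 2) ^ (0 + 2 * bitVal rest) * b
               = ((A ^ 2) ^ 2) ^ bitVal rest * b := by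
          rw [Nat.zero_add, pow_mul]
        rw [e]
        exact modEq_to_eq (((hA.pow 2).pow _).mul_right b)
    · have hb : bit = 1 := by
        rcases List.mem_cons.mp h1 with h | h
        · omega
        · exact absurd h hr
      rw [binLoop_no_one n rest hr, if_pos (by simp [hb]), if_pos hb,
          bitVal_eq_zero_of_not_mem rest hr]
      have e : (A ^ 2) ^ (1 + 2 * 0) * b = A ^ 2 * b := by ring
      rw [e]
      exact modEq_to_eq (hA.mul_right b)

-- A's helper computes a^k mod n for even k ≥ 2 (the only calls fermat makes)
theorem binh_eq (a n k : Int) (hn : 0 < n) (hk : 2 ≤ k) (he : k % 2 = 0) :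
    binhPhuongCoLap a k n = a ^ k.toNat % n := by
  simp only [binhPhuongCoLap, if_neg (show ¬ ((k == 0) = true) by simp; omega)]
  obtain ⟨m, hm⟩ : ∃ m : Nat, k.toNat = m + 2 := ⟨k.toNat - 2, by omega⟩
  have hme : (m + 2) % 2 = 0 := by omega
  rw [hm, show m + 2 = (m + 1) + 1 from rfl, bitsLSB,
      show (m + 1) + 1 = m + 2 from rfl]
  simp only [List.headD_cons, List.tail_cons, hme]
  rw [if_neg (by decide)]
  have hv : bitVal (bitsLSB ((m + 2) / 2)) = (m + 2) / 2 := bitVal_bitsLSB _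
  have hmem : 1 ∈ bitsLSB ((m + 2) / 2) := by
    by_contra h
    have h0 := bitVal_eq_zero_of_not_mem _ h
    omega
  rw [binLoop_val n hn _ hmem, hv, mul_one, ← pow_mul,
      show 2 * ((m + 2) / 2) = m + 2 from by omega]

theorem modpow_eq (a : Int) (k : Nat) (n : Int) (hn : 1 < n) :
    modpowAlt a k n = a ^ k % n := by
  induction k using Nat.strong_induction_on with
  | _ k ih =>
    rw [modpowAlt]
    by_cases h0 : k = 0
    · simp only [h0, if_true, pow_zero]
      exact (Int.emod_eq_of_lt (by omega) (by omega)).symm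
    · simp only [h0, if_false]
      rw [ih (k / 2) (Nat.div_lt_self (by omega) (by omega))]
      simp only [PySem.Int.mod_eq_emod_of_pos (show (0:Int) < n by omega)]
      have hP : a ^ (k / 2) % n * (a ^ (k / 2) % n) ≡ a ^ (k / 2) * a ^ (k / 2) [ZMOD n] :=
        (modEq_emod _ _).mul (modEq_emod _ _)
      rcases Nat.mod_two_eq_zero_or_one k with hpar | hpar
      · rw [if_neg (by omega)]
        have e : a ^ k = a ^ (k / 2) * a ^ (k / 2) := by
          conv_lhs => rw [show k = k / 2 + k / 2 from by omega]
          rw [pow_add]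
        rw [e]
        exact modEq_to_eq hP
      · rw [if_pos hpar]
        have e : a ^ k = a ^ (k / 2) * a ^ (k / 2) * a := by
          conv_lhs => rw [show k = k / 2 + k / 2 + 1 from by omega]
          rw [pow_add, pow_add, pow_one]
        rw [e]
        exact modEq_to_eq (((modEq_emod _ _).trans hP).mul (modEq_emod a n))

-- both exponentiations agree on fermat's calls
theorem binh_eq_modpow (a n : Int) (hn : 5 ≤ n) (hodd : n % 2 = 1) :
    binhPhuongCoLap a (n - 1) n = modpowAlt a (n - 1).toNat n := by
  rw [binh_eq a n (n - 1) (by omega) (by omega) (by omega),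
      modpow_eq a (n - 1).toNat n (by omega)]

theorem loop_eq_all (n : Int) (hn : 5 ≤ n) (hodd : n % 2 = 1) :
    ∀ (l : List Int) (a : Int),
      fermatLoop n l a =
        (PySem.List.pyRange a (a + l.length) 1).all
          (fun x => modpowAlt x (n - 1).toNat n == 1) := by
  intro l
  induction l with
  | nil =>
    intro a
    simp [fermatLoop, PySem.List.pyRange_one_eq_nil (le_refl a)]
  | cons y rest ih =>
    intro a
    simp only [fermatLoop]
    rw [binh_eq_modpow a n hn hodd]
    have hb : a + (((y :: rest).length : Nat) : Int) = (a + 1) + (rest.length : Int) := by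
      push_cast [List.length_cons]; ring
    rw [hb, PySem.List.pyRange_one_cons (by omega), List.all_cons, ih (a + 1)]
    by_cases h1 : modpowAlt a (n - 1).toNat n = 1
    · rw [if_neg (not_not_intro h1), beq_iff_eq.mpr h1, Bool.true_and]
    · rw [if_pos h1, beq_eq_false_iff_ne.mpr h1, Bool.false_and]

-- ===== VERDICT (by name: the statement is the Claim_ definition above) =====
theorem fermat_spec : Claim_equal_fermat := by
  intro n t _
  unfold Spec_fermat
  rw [fermat, fermat_alt]
  by_cases h2 : n < 2
  · rw [if_pos h2, if_pos (by simp [h2]), show (n == 2) = false from by simp; omega]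
  · by_cases he : n % 2 = 0
    · by_cases hn2 : n = 2
      · rw [if_neg h2, if_pos (by simp [hn2]), if_pos (by simp [he]),
            show (n == 2) = true from by simp [hn2]]
      · rw [if_neg h2, if_neg (by simp; omega), if_pos (by simp [he]),
            if_pos (by simp [he]), show (n == 2) = false from by simp [hn2]]
    · have hodd : n % 2 = 1 := by omega
      by_cases hn3 : n = 3
      · rw [if_neg h2, if_pos (by simp [hn3]), if_neg (by simp [hodd]; try omega),
            if_pos (by simp [hn3])]
      · have hn5 : 5 ≤ n := by omega
        rw [if_neg h2, if_neg (by simp; omega), if_neg (by simp [hodd]; try omega),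
            if_neg (by simp [hodd]; try omega), if_neg (by simp; omega)]
        rw [loop_eq_all n hn5 hodd (PySem.List.pyRange 1 (t + 1) 1) 2,
            PySem.List.length_pyRange_one]
        by_cases ht : 0 ≤ t
        · rw [show (2 : Int) + ((t + 1 - 1).toNat : Int) = t + 2 from by omega]
        · rw [PySem.List.pyRange_one_eq_nil (show (2:Int) + ((t + 1 - 1).toNat : Int) ≤ 2 from by omega),
              PySem.List.pyRange_one_eq_nil (show t + 2 ≤ 2 from by omega)]
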